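-- pv_equiv track=rewrite | github.com/LisandroRomero2023/progra1ecfm | Problema4.py | distgcd
-- ===== SOURCE A (Python) =====
-- from math import gcd
--
-- def distgcd(numa: int, numb: int):
--     r = []
--     for i in range(numa-numb):
--         z=0
--         l=gcd(numa-numb, numb+i)
--         for j in range(len(r)):
--             if l == r[j]:
--                 z = z+1
--                 break
--         if z == 0:
--             r.append(l)
--     return len(r)
-- ===== SOURCE B (Python) =====
-- def distgcd(numa: int, numb: int):
--     # The distinct values of gcd(d, numb+i) over d consecutive integers are
--     # exactly the divisors of d = numa - numb, so just count divisors.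
--     d = numa - numb
--     count = 0
--     for k in range(1, d + 1):
--         if d % k == 0:
--             count += 1
--     return count
-- ===== Notes on version B (the rewrite author's own statement) =====
-- stated objective: simpler
-- what changed: Instead of collecting distinct gcd(d, numb+i) values over the whole range with an inner membership scan, B counts the divisors of d = numa - numb directly (the distinct gcds over d consecutive integers are exactly the divisors of d).
import Mathlib
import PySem

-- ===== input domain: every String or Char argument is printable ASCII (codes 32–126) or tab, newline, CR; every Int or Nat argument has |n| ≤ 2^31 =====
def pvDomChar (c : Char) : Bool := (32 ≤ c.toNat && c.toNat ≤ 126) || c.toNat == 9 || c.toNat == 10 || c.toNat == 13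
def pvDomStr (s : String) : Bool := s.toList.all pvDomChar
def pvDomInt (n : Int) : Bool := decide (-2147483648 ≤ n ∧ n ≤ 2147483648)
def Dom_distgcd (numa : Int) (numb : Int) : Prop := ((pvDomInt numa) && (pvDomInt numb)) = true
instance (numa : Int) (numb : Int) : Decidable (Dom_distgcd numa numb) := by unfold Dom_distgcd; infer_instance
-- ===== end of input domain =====

-- B replaces A's scan for distinct gcd values by counting the divisors of numa - numb
-- (the distinct gcds over d consecutive integers are exactly the divisors of d): simpler.

-- ===== PORT A =====
-- inner loop 'for j in range(len(r)): if l == r[j]: z = z+1; break' — structural scan of r,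
-- returning the final z (0, or 1 at the first match, where the loop breaks)
def pvScanEq (l : Int) : List Int → Int
  | [] => 0
  | x :: xs => if l == x then 1 else pvScanEq l xs

def distgcd (numa : Int) (numb : Int) : Int :=
  let r := (PySem.List.pyRange 0 (numa - numb) 1).foldl
    (fun r i =>
      -- math.gcd(a, b) = Int.gcd (nonnegative gcd of absolute values): exact
      let l : Int := (Int.gcd (numa - numb) (numb + i) : Int)
      let z := pvScanEq l r
      if z == 0 then r ++ [l] else r) ([] : List Int)
  (r.length : Int)

-- ===== PORT B =====
def distgcd_alt (numa : Int) (numb : Int) : Int :=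
  let d := numa - numb
  (PySem.List.pyRange 1 (d + 1) 1).foldl
    (fun count k => if PySem.Int.mod d k == 0 then count + 1 else count) 0

-- ===== PRECONDITION & SPEC =====
def Spec_distgcd (numa : Int) (numb : Int) (out : Int) : Prop := out = distgcd_alt numa numb
instance (numa : Int) (numb : Int) (out : Int) : Decidable (Spec_distgcd numa numb out) := by unfold Spec_distgcd; infer_instance

-- ===== CLAIM (what is proved, stated in full; the proofs are below) =====
def Claim_equal_distgcd : Prop := ∀ (numa : Int) (numb : Int), Dom_distgcd numa numb → Spec_distgcd numa numb (distgcd numa numb)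

-- ===== LEMMAS AND PROOFS =====

-- pvScanEq detects membership
theorem pvScanEq_eq_zero_iff (l : Int) (r : List Int) : pvScanEq l r = 0 ↔ l ∉ r := by
  induction r with
  | nil => simp [pvScanEq]
  | cons x xs ih =>
    by_cases h : l = x
    · simp [pvScanEq, h]
    · simp [pvScanEq, h, ih]

-- A's accumulator: appending unseen elements keeps the list nodup and its finset tracks the input
theorem foldA_invariant (M : List Int) :
    ∀ r : List Int, r.Nodup →
      (M.foldl (fun r l => if pvScanEq l r == 0 then r ++ [l] else r) r).Nodup ∧
      (M.foldl (fun r l => if pvScanEq l r == 0 then r ++ [l] else r) r).toFinset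
        = r.toFinset ∪ M.toFinset := by
  induction M with
  | nil => intro r hr; simp [hr]
  | cons m M ih =>
    intro r hr
    by_cases hm : m ∈ r
    · have hz : ¬ (pvScanEq m r == 0) = true := by
        simp [pvScanEq_eq_zero_iff]; exact hm
      have := ih r hr
      simp only [List.foldl_cons, if_neg hz]
      refine ⟨this.1, ?_⟩
      rw [this.2, List.toFinset_cons, Finset.union_insert,
        Finset.insert_eq_self.mpr (Finset.mem_union.mpr (Or.inl (List.mem_toFinset.mpr hm)))]
    · have hz : (pvScanEq m r == 0) = true := by
        simp [pvScanEq_eq_zero_iff]; exact hm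
      have hr' : (r ++ [m]).Nodup := by
        simp only [List.nodup_append, List.nodup_singleton, true_and, hr]
        intro a ha b hb
        rw [List.mem_singleton] at hb
        subst hb
        exact fun h => hm (h ▸ ha)
      have := ih (r ++ [m]) hr'
      simp only [List.foldl_cons, if_pos hz]
      refine ⟨this.1, ?_⟩
      rw [this.2]
      ext x; simp

-- B's accumulator is a count
theorem foldB_count (p : Int → Bool) (M : List Int) :
    ∀ c : Int, (M.foldl (fun c k => if p k then c + 1 else c) c) = c + (M.countP p) := by
  induction M with
  | nil => intro c; simp
  | cons m M ih =>
    intro c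
    by_cases h : p m
    · simp [h, ih]; ring
    · simp [h, ih]

-- the set identity: the gcd values over the range are exactly the divisors of d
theorem gcd_image_eq_divisors (numa numb : Int) (hd : 0 < numa - numb) :
    ((PySem.List.pyRange 0 (numa - numb) 1).map
        (fun i => (Int.gcd (numa - numb) (numb + i) : Int))).toFinset
      = ((PySem.List.pyRange 1 (numa - numb + 1) 1).filter
          (fun k => PySem.Int.mod (numa - numb) k == 0)).toFinset := by
  set d := numa - numb with hdef
  ext x
  simp only [List.mem_toFinset, List.mem_map, List.mem_filter,
    PySem.List.mem_pyRange_one, beq_iff_eq, PySem.Int.mod_eq_zero_iff_dvd]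
  constructor
  · rintro ⟨i, ⟨-, -⟩, rfl⟩
    have hdvd : ((Int.gcd d (numb + i) : Nat) : Int) ∣ d := Int.gcd_dvd_left _ _
    have hne : Int.gcd d (numb + i) ≠ 0 := by
      intro h
      rcases Int.gcd_eq_zero_iff.mp h with ⟨h1, -⟩
      omega
    have hpos : (1 : Int) ≤ (Int.gcd d (numb + i) : Int) := by
      exact_mod_cast Nat.one_le_iff_ne_zero.mpr hne
    exact ⟨⟨hpos, by have := Int.le_of_dvd hd hdvd; omega⟩, hdvd⟩
  · rintro ⟨⟨h1, h2⟩, hdvd⟩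
    refine ⟨(x - numb) % d, ⟨Int.emod_nonneg _ (by omega), Int.emod_lt_of_pos _ hd⟩, ?_⟩
    have hrw : numb + (x - numb) % d = x + d * (-((x - numb) / d)) := by
      rw [Int.emod_def]; ring
    rw [hrw, Int.gcd_add_mul_left_right d x (-((x - numb) / d)),
      Int.gcd_eq_natAbs_right_iff_dvd.mpr hdvd]
    omega

-- ===== VERDICT (by name: the statement is the Claim_ definition above) =====
theorem distgcd_spec : Claim_equal_distgcd := by
  intro numa numb _
  unfold Spec_distgcd distgcd distgcd_alt
  dsimp only
  set d := numa - numb with hdef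
  by_cases hd : 0 < d
  · -- rewrite A's fold as a fold over the mapped gcd list
    rw [← List.foldl_map (f := fun i => ((Int.gcd d (numb + i) : Nat) : Int))
      (g := fun r l => if pvScanEq l r == 0 then r ++ [l] else r)
      (l := PySem.List.pyRange 0 d 1) (init := ([] : List Int))]
    obtain ⟨hnd, hfs⟩ := foldA_invariant
      ((PySem.List.pyRange 0 d 1).map (fun i => (Int.gcd d (numb + i) : Int)))
      [] List.nodup_nil
    rw [foldB_count]
    have hlen : (List.foldl (fun r l => if pvScanEq l r == 0 then r ++ [l] else r) []
        ((PySem.List.pyRange 0 d 1).map (fun i => (Int.gcd d (numb + i) : Int)))).length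
        = ((PySem.List.pyRange 0 d 1).map
            (fun i => (Int.gcd d (numb + i) : Int))).toFinset.card := by
      rw [← List.toFinset_card_of_nodup hnd, hfs]; simp
    rw [hlen, gcd_image_eq_divisors numa numb hd, ← hdef]
    have hndB : ((PySem.List.pyRange 1 (d + 1) 1).filter
        (fun k => PySem.Int.mod d k == 0)).Nodup :=
      (PySem.List.nodup_pyRange_one 1 (d + 1)).filter _
    rw [List.countP_eq_length_filter, List.toFinset_card_of_nodup hndB]
    simp
  · rw [PySem.List.pyRange_one_eq_nil (show (d:Int) ≤ 0 by omega),
      PySem.List.pyRange_one_eq_nil (show (d+1:Int) ≤ 1 by omega)]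
    simp
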